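-- pv_equiv track=rewrite | github.com/dirtysalt/codes | misc/leetcode/watering-plants-ii.py | minimumRefill
-- ===== SOURCE A (Python) =====
-- from typing import List
--
-- def minimumRefill(plants: List[int], capacityA: int, capacityB: int) -> int:
--     n = len(plants)
--     i, j = 0, n - 1
--     ans = 0
--     A, B = capacityA, capacityB
--     while i <= j:
--         if i == j:
--             if A < plants[i] and B < plants[i]:
--                 ans += 1
--             break
--
--         if A < plants[i]:
--             ans += 1
--             A = capacityA
--         A -= plants[i]
--         i += 1
--
--         if B < plants[j]:
--             ans += 1
--             B = capacityB
--         B -= plants[j]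
--         j -= 1
--     return ans
-- ===== SOURCE B (Python) =====
-- def _segments(seq, cap):
--     # Greedy segmentation over the running total: a refill starts a new
--     # segment; base is the running total at the most recent refill.
--     total = 0
--     base = 0
--     cnt = 0
--     for p in seq:
--         total += p
--         if total - base > cap:
--             cnt += 1
--             base = total - p
--     return cnt, cap - (total - base)
--
-- def minimumRefill(plants, capacityA, capacityB):
--     n = len(plants)
--     mid = n // 2
--     ca, leftA = _segments(plants[:mid], capacityA)
--     cb, leftB = _segments(plants[n - mid:][::-1], capacityB)
--     ans = ca + cb
--     if n % 2 == 1 and leftA < plants[mid] and leftB < plants[mid]: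
--         ans += 1
--     return ans
-- ===== Notes on version B (the rewrite author's own statement) =====
-- stated objective: alternative
-- what changed: Replaced A's interleaved two-pointer water-level simulation with greedy segmentation over running totals (a new segment whenever the total since the last refill exceeds capacity), run independently on the forward first half and the reversed last half, adding the two segment counts plus a separate odd-middle check.
import Mathlib
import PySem

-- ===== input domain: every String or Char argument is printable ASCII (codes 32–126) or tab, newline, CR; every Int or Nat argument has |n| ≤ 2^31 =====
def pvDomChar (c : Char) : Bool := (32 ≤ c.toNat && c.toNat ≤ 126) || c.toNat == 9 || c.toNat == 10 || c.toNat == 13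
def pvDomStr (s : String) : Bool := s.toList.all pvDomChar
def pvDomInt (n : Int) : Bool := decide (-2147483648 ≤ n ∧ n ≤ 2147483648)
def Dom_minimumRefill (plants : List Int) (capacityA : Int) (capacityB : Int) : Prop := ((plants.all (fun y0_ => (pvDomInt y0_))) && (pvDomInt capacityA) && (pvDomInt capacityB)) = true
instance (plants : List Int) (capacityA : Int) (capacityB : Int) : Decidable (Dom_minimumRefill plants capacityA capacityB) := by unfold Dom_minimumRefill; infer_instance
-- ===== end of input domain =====

-- B replaces A's interleaved two-pointer water-level simulation by greedy running-total
-- segmentation applied to the two halves independently (alternative decomposition, same O(n)).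

-- ===== PORT A =====
-- A's while-loop: state (i, j, ans, A, B); indices are always in range when read,
-- so plants[i] is ported as pyGetD _ _ 0 (exact on every reached read).
def pvLoopA (plants : List Int) (capacityA capacityB : Int)
    (i j ans A B : Int) : Int :=
  if _h : i ≤ j then
    if i = j then
      if A < PySem.List.pyGetD plants i 0 ∧ B < PySem.List.pyGetD plants i 0 then ans + 1 else ans
    else
      let pi := PySem.List.pyGetD plants i 0
      let ans1 := if A < pi then ans + 1 else ans
      let A1 := (if A < pi then capacityA else A) - pi
      let pj := PySem.List.pyGetD plants j 0
      let ans2 := if B < pj then ans1 + 1 else ans1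
      let B1 := (if B < pj then capacityB else B) - pj
      pvLoopA plants capacityA capacityB (i + 1) (j - 1) ans2 A1 B1
  else ans
termination_by (j - i).toNat
decreasing_by omega

def minimumRefill (plants : List Int) (capacityA : Int) (capacityB : Int) : Int :=
  pvLoopA plants capacityA capacityB 0 ((plants.length : Int) - 1) 0 capacityA capacityB

-- ===== PORT B =====
-- Source B's _segments loop body: state (total, base, cnt)
def pvSeg (cap : Int) (s : Int × Int × Int) (p : Int) : Int × Int × Int :=
  let total := s.1 + p
  if total - s.2.1 > cap then (total, total - p, s.2.2 + 1) else (total, s.2.1, s.2.2)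

-- Source B's _segments: (refill count, leftover water)
def pvSegments (seq : List Int) (cap : Int) : Int × Int :=
  let r := seq.foldl (pvSeg cap) (0, 0, 0)
  (r.2.2, cap - (r.1 - r.2.1))

def minimumRefill_alt (plants : List Int) (capacityA : Int) (capacityB : Int) : Int :=
  let n : Int := plants.length
  let mid := PySem.Int.floordiv n 2
  let a := pvSegments (PySem.List.slice plants none (some mid)) capacityA
  let b := pvSegments (PySem.List.slice plants (some (n - mid)) none).reverse capacityB
  let ans := a.1 + b.1
  if PySem.Int.mod n 2 = 1 ∧ a.2 < PySem.List.pyGetD plants mid 0 ∧ b.2 < PySem.List.pyGetD plants mid 0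
  then ans + 1 else ans

-- ===== PRECONDITION & SPEC =====
def Spec_minimumRefill (plants : List Int) (capacityA : Int) (capacityB : Int) (out : Int) : Prop := out = minimumRefill_alt plants capacityA capacityB
instance (plants : List Int) (capacityA : Int) (capacityB : Int) (out : Int) : Decidable (Spec_minimumRefill plants capacityA capacityB out) := by unfold Spec_minimumRefill; infer_instance

-- ===== CLAIM (what is proved, stated in full; the proofs are below) =====
def Claim_equal_minimumRefill : Prop := ∀ (plants : List Int) (capacityA : Int) (capacityB : Int), Dom_minimumRefill plants capacityA capacityB → Spec_minimumRefill plants capacityA capacityB (minimumRefill plants capacityA capacityB)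

-- ===== LEMMAS AND PROOFS =====

-- proof-only bridge: one watering step as A performs it, state (refills, water)
def pvStep (cap : Int) (s : Int × Int) (p : Int) : Int × Int :=
  ((if s.2 < p then s.1 + 1 else s.1), (if s.2 < p then cap else s.2) - p)

-- the refill counter threads additively through a pvStep pass; the leftover water ignores it
lemma foldl_pvStep_add (c d : Int) (l : List Int) : ∀ (a w : Int),
    List.foldl (pvStep c) (a + d, w) l
      = ((List.foldl (pvStep c) (a, w) l).1 + d, (List.foldl (pvStep c) (a, w) l).2) := by
  induction l with
  | nil => intro a w; simp
  | cons p l ih =>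
    intro a w
    simp only [List.foldl_cons, pvStep]
    split_ifs with h
    · rw [show a + d + 1 = (a + 1) + d by ring, ih]
    · rw [ih]

-- B's running-total segmentation simulates A's water level: with water = cap - (total - base),
-- the segment count is the refill count and cap - (total - base) is the leftover water
lemma foldl_pvSeg_eq_pvStep (cap : Int) (l : List Int) : ∀ (t b c : Int),
    List.foldl (pvSeg cap) (t, b, c) l
      = (t + l.sum,
         t + l.sum - (cap - (List.foldl (pvStep cap) (c, cap - (t - b)) l).2),
         (List.foldl (pvStep cap) (c, cap - (t - b)) l).1) := by
  induction l with
  | nil => intro t b c; simp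
  | cons p l ih =>
    intro t b c
    simp only [List.foldl_cons, pvSeg, pvStep, List.sum_cons]
    have hcond : (t + p - b > cap) ↔ (cap - (t - b) < p) := by omega
    by_cases h : cap - (t - b) < p
    · rw [if_pos (hcond.mpr h), if_pos h, if_pos h, ih]
      simp only [show cap - (t + p - (t + p - p)) = cap - p from by ring, Prod.mk.injEq]
      exact ⟨by ring, by ring, trivial⟩
    · rw [if_neg (fun hh => h (hcond.mp hh)), if_neg h, if_neg h, ih]
      simp only [show cap - (t + p - b) = cap - (t - b) - p from by ring, Prod.mk.injEq]
      exact ⟨by ring, by ring, trivial⟩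
  
-- A's two-pointer loop on segment [i, j] = forward pvStep pass on its left half,
-- backward pvStep pass on its right half, then the middle check (k = segment length)
lemma pvLoopA_eq (plants : List Int) (capA capB : Int) :
    ∀ (k : ℕ) (i j ans A B : Int), 0 ≤ i → j < (plants.length : Int) → (j + 1 - i).toNat = k →
    pvLoopA plants capA capB i j ans A B =
      (let t : ℕ := k / 2
       let sA := List.foldl (pvStep capA) (ans, A) ((plants.drop i.toNat).take t)
       let sB := List.foldl (pvStep capB) (sA.1, B) (((plants.drop (j + 1 - (t : Int)).toNat).take t).reverse)
       if k % 2 = 1 ∧ sA.2 < PySem.List.pyGetD plants (i + t) 0 ∧ sB.2 < PySem.List.pyGetD plants (i + t) 0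
       then sB.1 + 1 else sB.1) := by
  intro k
  induction k using Nat.strong_induction_on with
  | _ k ih =>
    intro i j ans A B hi hj hk
    rcases lt_trichotomy i j with hij | hij | hij
    · -- i < j : one loop iteration, then the IH at k - 2
      have hk2 : 2 ≤ k := by omega
      have hiN : i.toNat < plants.length := by omega
      have hjN : j.toNat < plants.length := by omega
      have hpi : PySem.List.pyGetD plants i 0 = plants[i.toNat] := by
        exact PySem.List.pyGetD_eq_getElem plants 0 (by omega) (by omega)
      have hpj : PySem.List.pyGetD plants j 0 = plants[j.toNat] := by
        exact PySem.List.pyGetD_eq_getElem plants 0 (by omega) (by omega)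
      rw [pvLoopA, dif_pos (le_of_lt hij), if_neg (ne_of_lt hij)]
      simp only [hpi, hpj]
      rw [ih (k - 2) (by omega) (i + 1) (j - 1)
        (if B < plants[j.toNat] then (if A < plants[i.toNat] then ans + 1 else ans) + 1
         else (if A < plants[i.toNat] then ans + 1 else ans))
        ((if A < plants[i.toNat] then capA else A) - plants[i.toNat])
        ((if B < plants[j.toNat] then capB else B) - plants[j.toNat])
        (by omega) (by omega) (by omega)]
      obtain ⟨u, htu⟩ : ∃ u, k / 2 = u + 1 := ⟨k / 2 - 1, by omega⟩
      have htk : (k - 2) / 2 = u := by omega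
      have hpar : (k - 2) % 2 = k % 2 := by omega
      have hi1 : (i + 1).toNat = i.toNat + 1 := by omega
      have hmid : i + 1 + (u : Int) = i + ((u : Int) + 1) := by ring
      have hdropidx : (j - 1 + 1 - (u : Int)).toNat = (j + 1 - ((u : Int) + 1)).toNat := by omega
      have hsegL : List.take (u + 1) (List.drop i.toNat plants)
          = plants[i.toNat] :: List.take u (List.drop (i.toNat + 1) plants) := by
        rw [List.drop_eq_getElem_cons hiN, List.take_succ_cons]
      have hn : (j + 1 - ((u : Int) + 1)).toNat + u = j.toNat := by omega
      have hsegR : List.take (u + 1) (List.drop (j + 1 - ((u : Int) + 1)).toNat plants)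
          = List.take u (List.drop (j + 1 - ((u : Int) + 1)).toNat plants) ++ [plants[j.toNat]] := by
        rw [List.take_add_one, List.getElem?_drop, hn, List.getElem?_eq_getElem hjN]
        rfl
      simp only [htu, htk, hpar, hi1, hdropidx, Nat.cast_add, Nat.cast_one, hmid, hsegL, hsegR,
        List.foldl_cons, List.reverse_append, List.reverse_singleton, List.singleton_append, pvStep]
      by_cases hB : B < plants[j.toNat] <;> by_cases hA : A < plants[i.toNat] <;>
        simp only [hB, hA, if_true, if_false]
      · rw [foldl_pvStep_add capA 1 (List.take u (List.drop (i.toNat + 1) plants))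
            (ans + 1) (capA - plants[i.toNat])]
      · rw [foldl_pvStep_add capA 1 (List.take u (List.drop (i.toNat + 1) plants))
            ans (A - plants[i.toNat])]
    · -- i = j : single middle element
      subst hij
      rw [pvLoopA]
      have hk1 : k = 1 := by omega
      subst hk1
      have hpi : PySem.List.pyGetD plants i 0 = plants[i.toNat] := by
        exact PySem.List.pyGetD_eq_getElem plants 0 (by omega) (by omega)
      simp only [le_refl, dif_pos]
      simp [hpi]
    · -- j < i : loop does nothing
      have hk0 : k = 0 := by omega
      subst hk0
      rw [pvLoopA]
      simp [show ¬ i ≤ j by omega]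

-- pvSegments from a fresh counter is exactly the pvStep pass from (0, cap)
lemma pvSegments_eq (seq : List Int) (cap : Int) :
    pvSegments seq cap
      = ((List.foldl (pvStep cap) (0, cap) seq).1, (List.foldl (pvStep cap) (0, cap) seq).2) := by
  unfold pvSegments
  rw [foldl_pvSeg_eq_pvStep cap seq 0 0 0]
  simp

-- ===== VERDICT (by name: the statement is the Claim_ definition above) =====
theorem minimumRefill_spec : Claim_equal_minimumRefill := by
  intro plants capA capB _
  unfold Spec_minimumRefill minimumRefill minimumRefill_alt
  rw [pvLoopA_eq plants capA capB plants.length 0 ((plants.length : Int) - 1) 0 capA capB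
      (by omega) (by omega) (by omega)]
  have hmid : PySem.Int.floordiv (plants.length : Int) 2 = ((plants.length / 2 : ℕ) : Int) := by
    exact_mod_cast PySem.Int.floordiv_natCast plants.length 2
  have hmod : PySem.Int.mod (plants.length : Int) 2 = ((plants.length % 2 : ℕ) : Int) := by
    exact_mod_cast PySem.Int.mod_natCast plants.length 2
  have hidx : (plants.length : Int) - 1 + 1 - ((plants.length / 2 : ℕ) : Int)
      = (plants.length : Int) - ((plants.length / 2 : ℕ) : Int) := by ring
  have hfrom : PySem.List.slice plants (some ((plants.length : Int) - ((plants.length / 2 : ℕ) : Int))) none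
      = List.drop ((plants.length : Int) - ((plants.length / 2 : ℕ) : Int)).toNat plants := by
    exact PySem.List.slice_from plants (by omega)
  have htake : List.take (plants.length / 2)
      (List.drop ((plants.length : Int) - ((plants.length / 2 : ℕ) : Int)).toNat plants)
      = List.drop ((plants.length : Int) - ((plants.length / 2 : ℕ) : Int)).toNat plants := by
    apply List.take_of_length_le
    simp only [List.length_drop]
    omega
  simp only [hmid, hmod, hidx, hfrom, PySem.List.slice_to_natCast, zero_add,
    Int.toNat_zero, List.drop_zero, htake, pvSegments_eq]
  have hadd := foldl_pvStep_add capB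
      ((List.foldl (pvStep capA) (0, capA) (List.take (plants.length / 2) plants)).1)
      (List.drop ((plants.length : Int) - ((plants.length / 2 : ℕ) : Int)).toNat plants).reverse 0 capB
  rw [zero_add] at hadd
  rw [hadd]
  have hpar : (((plants.length % 2 : ℕ) : Int) = 1) ↔ (plants.length % 2 = 1) := by omega
  simp only [hpar]
  split_ifs with h
  · ring
  · rw [Int.add_comm]
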